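-- pv_equiv track=rewrite | github.com/nipa0827/Metrics | FindProperties.py | findAllCall
-- ===== SOURCE A (Python) =====
-- def findAllCall(class_name, content):
--
--     total_call = 0
--     total_call_class = 0
--
--     for cls_n in class_name:
--         found = False
--
--         for line in content:
--             if cls_n in line:
--                 found = True
--                 total_call += 1
--
--
--         if found:
--             total_call_class += 1
--
--     return total_call, total_call_class
-- ===== SOURCE B (Python) =====
-- def findAllCall(class_name, content):
--     # Line-outer pass: count hits per distinct class in one dict, then total up.
--     classes = list(dict.fromkeys(class_name))
--     hits = {}
--     for line in content:
--         for cls in classes: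
--             if cls in line:
--                 hits[cls] = hits.get(cls, 0) + 1
--     total_call = sum(hits.get(c, 0) for c in class_name)
--     total_call_class = sum(1 for c in class_name if c in hits)
--     return total_call, total_call_class
-- ===== Notes on version B (the rewrite author's own statement) =====
-- stated objective: alternative
-- what changed: Inverted the loop nest: one line-outer pass fills a per-class hit-count dict over the deduplicated class list, and both totals are read off the dict afterwards; duplicate class names are scanned only once.
import Mathlib
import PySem

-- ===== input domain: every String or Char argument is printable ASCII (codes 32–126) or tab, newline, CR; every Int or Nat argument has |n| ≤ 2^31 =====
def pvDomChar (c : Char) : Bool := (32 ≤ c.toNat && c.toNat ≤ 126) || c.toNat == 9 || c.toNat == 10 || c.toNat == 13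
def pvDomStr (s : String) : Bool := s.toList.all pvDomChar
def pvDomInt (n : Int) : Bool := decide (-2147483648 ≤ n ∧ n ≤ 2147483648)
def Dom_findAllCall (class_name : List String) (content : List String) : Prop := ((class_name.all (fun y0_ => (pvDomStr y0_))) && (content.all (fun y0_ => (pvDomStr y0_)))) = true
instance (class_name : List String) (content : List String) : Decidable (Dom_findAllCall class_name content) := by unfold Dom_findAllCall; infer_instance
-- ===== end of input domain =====

-- B inverts A's loop nest: one line-outer pass fills a per-class hit-count dict over the
-- deduplicated class list, and both totals are read off the dict afterwards (objective: alternative).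


-- ===== PORT A =====
-- class-outer loop; inner loop over content carries (found, total_call)
def findAllCall (class_name : List String) (content : List String) : Int × Int :=
  class_name.foldl
    (fun (acc : Int × Int) cls_n =>
      let r := content.foldl
        (fun (st : Bool × Int) line =>
          if PySem.Str.isIn cls_n line then (true, st.2 + 1) else st)
        (false, acc.1)
      (r.2, if r.1 then acc.2 + 1 else acc.2))
    (0, 0)

-- ===== PORT B =====
-- line-outer loop over a hit-count dict keyed by the deduplicated class list;
-- hits.get(c, 0) / 'c in hits' are Dict.getD / Dict.contains (keys are always present or absent, exact)
def findAllCall_alt (class_name : List String) (content : List String) : Int × Int :=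
  let classes := PySem.List.dedup class_name
  let hits := content.foldl
    (fun d line =>
      classes.foldl
        (fun d' cls => if PySem.Str.isIn cls line then d'.modify cls 0 (· + 1) else d')
        d)
    PySem.Dict.empty
  ((class_name.map (fun c => hits.getD c 0)).sum,
   (class_name.map (fun c => if hits.contains c then (1 : Int) else 0)).sum)

-- ===== PRECONDITION & SPEC =====
def Spec_findAllCall (class_name : List String) (content : List String) (out : Int × Int) : Prop := out = findAllCall_alt class_name content
instance (class_name : List String) (content : List String) (out : Int × Int) : Decidable (Spec_findAllCall class_name content out) := by unfold Spec_findAllCall; infer_instance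

-- ===== CLAIM (what is proved, stated in full; the proofs are below) =====
def Claim_equal_findAllCall : Prop := ∀ (class_name : List String) (content : List String), Dom_findAllCall class_name content → Spec_findAllCall class_name content (findAllCall class_name content)

-- ===== LEMMAS AND PROOFS =====

-- a conditional-update fold equals the fold over the filtered list
theorem pv_foldl_filter {α β : Type} (p : α → Bool) (f : β → α → β) :
    ∀ (l : List α) (b : β),
      l.foldl (fun a x => if p x then f a x else a) b = (l.filter p).foldl f b := by
  intro l
  induction l with
  | nil => intro b; rfl
  | cons x xs ih =>
      intro b
      by_cases h : p x = true
      · rw [List.foldl_cons, List.filter_cons, if_pos h, if_pos h, List.foldl_cons, ih]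
      · rw [List.foldl_cons, List.filter_cons, if_neg h, if_neg h, ih]

-- a fold that adds f to the first and g to the second component, in closed form
theorem pv_pair_foldl (f g : String → Int) :
    ∀ (cn : List String) (t k : Int),
      cn.foldl (fun (acc : Int × Int) c => (acc.1 + f c, acc.2 + g c)) (t, k)
        = (t + (cn.map f).sum, k + (cn.map g).sum) := by
  intro cn
  induction cn with
  | nil => intro t k; simp
  | cons c rest ih =>
      intro t k
      rw [List.foldl_cons, ih, List.map_cons, List.map_cons, List.sum_cons, List.sum_cons]
      refine Prod.ext ?_ ?_ <;> simp <;> ring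

-- A's inner loop: found-flag becomes 'any', total gains the number of matching lines
theorem pv_A_inner (cls : String) :
    ∀ (content : List String) (b : Bool) (t : Int),
      content.foldl
        (fun (st : Bool × Int) line =>
          if PySem.Str.isIn cls line then (true, st.2 + 1) else st)
        (b, t)
      = (b || content.any (fun line => PySem.Str.isIn cls line),
         t + ((content.filter (fun line => PySem.Str.isIn cls line)).length : Int)) := by
  intro content
  induction content with
  | nil => intro b t; simp
  | cons line rest ih =>
      intro b t
      rw [List.foldl_cons, List.any_cons, List.filter_cons]
      by_cases h : PySem.Str.isIn cls line = true
      · rw [if_pos h, ih, h, if_pos rfl, List.length_cons, Prod.mk.injEq]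
        exact ⟨by simp, by push_cast; ring⟩
      · rw [if_neg h, ih]
        rw [Bool.not_eq_true] at h
        rw [h, Bool.false_or, if_neg Bool.false_ne_true]

-- A in closed form
theorem pv_A_eq (cn content : List String) :
    findAllCall cn content
      = ((cn.map (fun c => ((content.filter (fun line => PySem.Str.isIn c line)).length : Int))).sum,
         (cn.map (fun c => if content.any (fun line => PySem.Str.isIn c line) then (1 : Int) else 0)).sum) := by
  unfold findAllCall
  have hstep :
      (fun (acc : Int × Int) cls_n =>
        let r := content.foldl
          (fun (st : Bool × Int) line =>
            if PySem.Str.isIn cls_n line then (true, st.2 + 1) else st)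
          (false, acc.1)
        (r.2, if r.1 then acc.2 + 1 else acc.2))
      = (fun (acc : Int × Int) c =>
          (acc.1 + ((content.filter (fun line => PySem.Str.isIn c line)).length : Int),
           acc.2 + (if content.any (fun line => PySem.Str.isIn c line) then (1 : Int) else 0))) := by
    funext acc c
    simp only [pv_A_inner, Bool.false_or]
    split_ifs with h
    · rfl
    · rw [add_zero]
  rw [hstep, pv_pair_foldl]
  rw [zero_add, zero_add]

-- the multiset of (line, class) hits B counts, flattened
def pvHits (classes : List String) (content : List String) : List String :=
  content.flatMap (fun line => classes.filter (fun cls => PySem.Str.isIn cls line))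

-- B's dict is the counter of pvHits
theorem pv_B_dict (classes content : List String) :
    content.foldl
      (fun d line =>
        classes.foldl
          (fun d' cls => if PySem.Str.isIn cls line then d'.modify cls 0 (· + 1) else d')
          d)
      PySem.Dict.empty
    = PySem.Dict.counter (pvHits classes content) := by
  rw [PySem.Dict.counter_eq_foldl, pvHits, List.foldl_flatMap]
  congr 1
  funext d line
  exact pv_foldl_filter _ _ classes d

theorem pv_count_pvHits (classes : List String) (hnd : classes.Nodup) (c : String)
    (hc : c ∈ classes) :
    ∀ content : List String,
      (pvHits classes content).count c
        = (content.filter (fun line => PySem.Str.isIn c line)).length := by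
  intro content
  induction content with
  | nil => rfl
  | cons line rest ih =>
      rw [pvHits, List.flatMap_cons, List.count_append, ← pvHits, ih, List.filter_cons]
      by_cases h : PySem.Str.isIn c line = true
      · rw [if_pos h,
          List.count_filter (p := fun cls => PySem.Str.isIn cls line) (a := c) (l := classes) h,
          List.count_eq_one_of_mem hnd hc, List.length_cons]
        omega
      · have h0 : List.count c (classes.filter (fun cls => PySem.Str.isIn cls line)) = 0 := by
          rw [List.count_eq_zero]
          intro hmem
          exact h (List.mem_filter.mp hmem).2
        rw [if_neg h, h0, Nat.zero_add]

theorem pv_mem_pvHits (classes content : List String) (c : String) (hc : c ∈ classes) :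
    (c ∈ pvHits classes content) ↔ content.any (fun line => PySem.Str.isIn c line) = true := by
  simp only [pvHits, List.mem_flatMap, List.mem_filter, List.any_eq_true]
  constructor
  · rintro ⟨line, hl, _, hin⟩; exact ⟨line, hl, hin⟩
  · rintro ⟨line, hl, hin⟩; exact ⟨line, hl, hc, hin⟩

-- B in the same closed form
theorem pv_B_eq (cn content : List String) :
    findAllCall_alt cn content
      = ((cn.map (fun c => ((content.filter (fun line => PySem.Str.isIn c line)).length : Int))).sum,
         (cn.map (fun c => if content.any (fun line => PySem.Str.isIn c line) then (1 : Int) else 0)).sum) := by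
  unfold findAllCall_alt
  simp only [pv_B_dict]
  have hnd := PySem.List.nodup_dedup cn
  refine Prod.ext ?_ ?_
  · refine congrArg List.sum (List.map_congr_left ?_)
    intro c hc
    have hcd : c ∈ PySem.List.dedup cn := (PySem.List.mem_dedup cn c).mpr hc
    rw [PySem.Dict.getD_counter, pv_count_pvHits _ hnd c hcd content]
  · refine congrArg List.sum (List.map_congr_left ?_)
    intro c hc
    have hcd : c ∈ PySem.List.dedup cn := (PySem.List.mem_dedup cn c).mpr hc
    have hc2 : (pvHits (PySem.List.dedup cn) content).contains c
        = content.any (fun line => PySem.Str.isIn c line) := by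
      by_cases h : content.any (fun line => PySem.Str.isIn c line) = true
      · rw [h]
        exact List.contains_iff_mem.mpr ((pv_mem_pvHits _ content c hcd).mpr h)
      · rw [Bool.not_eq_true] at h
        rw [h]
        refine Bool.eq_false_iff.mpr ?_
        intro hm
        have hany := (pv_mem_pvHits _ content c hcd).mp (List.contains_iff_mem.mp hm)
        rw [h] at hany
        exact Bool.false_ne_true hany
    rw [PySem.Dict.contains_counter, hc2]

-- ===== VERDICT (by name: the statement is the Claim_ definition above) =====
theorem findAllCall_spec : Claim_equal_findAllCall := by
  intro class_name content _
  unfold Spec_findAllCall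
  rw [pv_A_eq, pv_B_eq]
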